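-- pv_equiv track=rewrite | github.com/y-bai/bgi-cnv | data_prepare/mat_crt_train_data.py | read_feat_block
-- ===== SOURCE A (Python) =====
-- def read_feat_block(seq, block_by):
--     """
--     A generator that splits a read cnv feature file block by block that is indicated by #
--     :param seq: input cnv features
--     :param block_by: indicator of the block, which is #
--     :return: iterator of block data
--     """
--     dat = []
--     for line in seq:
--         if line.startswith(block_by):
--             if dat:
--                 yield dat
--                 dat = []
--
--         dat.append(line)
--
--     if dat:
--         yield dat
-- ===== SOURCE B (Python) =====
-- def _span_end(seq, start, block_by):
--     """Index of the first marker line at or after start (len(seq) if none)."""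
--     j = start
--     while j < len(seq) and not seq[j].startswith(block_by):
--         j += 1
--     return j
--
-- def read_feat_block(seq, block_by):
--     """Split seq into blocks: each line starting with block_by opens a new
--     block; leading non-marker lines form the first block."""
--     seq = list(seq)
--     i = 0
--     while i < len(seq):
--         j = _span_end(seq, i + 1, block_by)
--         yield seq[i:j]
--         i = j
-- ===== Notes on version B (the rewrite author's own statement) =====
-- stated objective: alternative
-- what changed: B replaces A's accumulator-and-flush single pass (collect lines in a buffer, flush it whenever a marker arrives and at the end) by an index-based scan: repeatedly find the index of the next marker line and slice the block seq[i:j] out directly, with no buffer at all.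
import Mathlib
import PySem

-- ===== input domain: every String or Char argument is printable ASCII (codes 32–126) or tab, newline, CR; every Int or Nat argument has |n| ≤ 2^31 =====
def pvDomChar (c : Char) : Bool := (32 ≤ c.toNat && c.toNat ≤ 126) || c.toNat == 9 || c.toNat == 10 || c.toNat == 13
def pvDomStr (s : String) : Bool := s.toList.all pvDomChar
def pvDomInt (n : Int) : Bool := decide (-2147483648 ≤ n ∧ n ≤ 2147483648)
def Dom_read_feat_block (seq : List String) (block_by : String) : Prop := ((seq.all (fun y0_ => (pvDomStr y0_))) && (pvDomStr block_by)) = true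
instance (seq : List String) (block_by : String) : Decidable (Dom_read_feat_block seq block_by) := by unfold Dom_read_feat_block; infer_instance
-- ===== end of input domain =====

-- B replaces A's accumulator-and-flush pass by index scans: find the next marker index and slice out each block (alternative structure, same cost).
-- ===== PORT A =====
-- A's loop: accumulate lines in dat, flushing (yielding) the buffer when a marker line
-- arrives with a non-empty buffer, and once more at the end.
def pvGoA (block_by : String) : List String → List String → List (List String)
  | [], dat => if dat ≠ [] then [dat] else []
  | line :: rest, dat =>
    if PySem.Str.startswith line block_by then
      (if dat ≠ [] then [dat] else []) ++ pvGoA block_by rest [line]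
    else
      pvGoA block_by rest (dat ++ [line])

def read_feat_block (seq : List String) (block_by : String) : List (List String) :=
  pvGoA block_by seq []

-- ===== PORT B =====
-- Source B's _span_end: index of the first marker line at or after j (seq.length if none).
def pvSpanEnd (seq : List String) (block_by : String) (j : Nat) : Nat :=
  if h : j < seq.length then
    if PySem.Str.startswith seq[j] block_by then j
    else pvSpanEnd seq block_by (j + 1)
  else j
termination_by seq.length - j

-- used by pvGoBIdx's termination proof
theorem pvSpanEnd_ge (seq : List String) (block_by : String) (j : Nat) :
    j ≤ pvSpanEnd seq block_by j := by
  rw [pvSpanEnd]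
  split
  · split
    · exact le_refl j
    · exact Nat.le_of_succ_le (pvSpanEnd_ge seq block_by (j + 1))
  · exact le_refl j
termination_by seq.length - j

-- Source B's main loop: slice out seq[i:j] for each block, advancing i to the next marker.
def pvGoBIdx (seq : List String) (block_by : String) (i : Nat) : List (List String) :=
  if i < seq.length then
    PySem.List.slice seq (some (i : Int)) (some ((pvSpanEnd seq block_by (i + 1) : Nat) : Int)) ::
      pvGoBIdx seq block_by (pvSpanEnd seq block_by (i + 1))
  else []
termination_by seq.length - i
decreasing_by have := pvSpanEnd_ge seq block_by (i + 1); omega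

def read_feat_block_alt (seq : List String) (block_by : String) : List (List String) :=
  pvGoBIdx seq block_by 0

-- ===== PRECONDITION & SPEC =====
def Spec_read_feat_block (seq : List String) (block_by : String) (out : List (List String)) : Prop := out = read_feat_block_alt seq block_by
instance (seq : List String) (block_by : String) (out : List (List String)) : Decidable (Spec_read_feat_block seq block_by out) := by unfold Spec_read_feat_block; infer_instance

-- ===== CLAIM (what is proved, stated in full; the proofs are below) =====
def Claim_equal_read_feat_block : Prop := ∀ (seq : List String) (block_by : String), Dom_read_feat_block seq block_by → Spec_read_feat_block seq block_by (read_feat_block seq block_by)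

-- ===== LEMMAS AND PROOFS =====
-- Proof-only bridge: a list-structural span/blocks pair; both ports are shown equal to pvListGo.
def pvListSpan (block_by : String) : List String → List String × List String
  | [] => ([], [])
  | x :: xs =>
    if PySem.Str.startswith x block_by then ([], x :: xs)
    else
      ((x :: (pvListSpan block_by xs).1), (pvListSpan block_by xs).2)

theorem pvListSpan_len (block_by : String) : ∀ xs : List String, (pvListSpan block_by xs).2.length ≤ xs.length := by
  intro xs
  induction xs with
  | nil => simp [pvListSpan]
  | cons x xs ih =>
    simp only [pvListSpan]
    split
    · simp
    · simpa using Nat.le_succ_of_le ih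

def pvListGo (block_by : String) : List String → List (List String)
  | [] => []
  | x :: xs =>
    (x :: (pvListSpan block_by xs).1) :: pvListGo block_by (pvListSpan block_by xs).2
termination_by l => l.length
decreasing_by simpa using Nat.lt_succ_of_le (pvListSpan_len block_by xs)

-- A's loop with a non-empty buffer: yield (dat ++ spanned body), then continue as pvListGo.
theorem pvGoA_inv (block_by : String) : ∀ (xs dat : List String), dat ≠ [] →
    pvGoA block_by xs dat =
      (dat ++ (pvListSpan block_by xs).1) :: pvListGo block_by (pvListSpan block_by xs).2 := by
  intro xs
  induction xs with
  | nil => intro dat h; simp [pvGoA, pvListSpan, pvListGo, h]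
  | cons x xs ih =>
    intro dat h
    simp only [pvGoA, pvListSpan]
    split
    · simp [pvListGo, ih [x] (by simp)]
    · simpa using ih (dat ++ [x]) (by simp)

theorem read_feat_block_eq_listGo (seq : List String) (block_by : String) :
    read_feat_block seq block_by = pvListGo block_by seq := by
  cases seq with
  | nil => simp [read_feat_block, pvGoA, pvListGo]
  | cons x xs =>
    simp only [read_feat_block, pvGoA, pvListGo]
    split
    · simpa using pvGoA_inv block_by xs [x] (by simp)
    · simpa using pvGoA_inv block_by xs [x] (by simp)

theorem pvListSpan_fst_take (block_by : String) : ∀ xs : List String,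
    (pvListSpan block_by xs).1 = xs.take (pvListSpan block_by xs).1.length := by
  intro xs
  induction xs with
  | nil => simp [pvListSpan]
  | cons x xs ih =>
    simp only [pvListSpan]
    split
    · simp
    · simp only [List.length_cons, List.take_succ_cons]
      rw [← ih]

theorem pvListSpan_snd_drop (block_by : String) : ∀ xs : List String,
    (pvListSpan block_by xs).2 = xs.drop (pvListSpan block_by xs).1.length := by
  intro xs
  induction xs with
  | nil => simp [pvListSpan]
  | cons x xs ih =>
    simp only [pvListSpan]
    split
    · simp
    · simp only [List.length_cons, List.drop_succ_cons]
      exact ih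

theorem pvSpanEnd_eq (seq : List String) (block_by : String) : ∀ (k j : Nat), seq.length - j ≤ k →
    pvSpanEnd seq block_by j = j + (pvListSpan block_by (seq.drop j)).1.length := by
  intro k
  induction k with
  | zero =>
    intro j h
    rw [pvSpanEnd]
    have hj : ¬ j < seq.length := by omega
    simp [hj, List.drop_eq_nil_of_le (by omega : seq.length ≤ j), pvListSpan]
  | succ k ih =>
    intro j h
    rw [pvSpanEnd]
    by_cases hj : j < seq.length
    · have hd : seq.drop j = seq[j] :: seq.drop (j + 1) := List.drop_eq_getElem_cons hj
      by_cases hm : PySem.Str.startswith seq[j] block_by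
      · rw [dif_pos hj, if_pos hm, hd]
        simp only [pvListSpan, if_pos hm, List.length_nil, Nat.add_zero]
      · rw [dif_pos hj, if_neg hm, ih (j + 1) (by omega), hd]
        simp only [pvListSpan, if_neg hm, List.length_cons]
        omega
    · simp [hj, List.drop_eq_nil_of_le (by omega : seq.length ≤ j), pvListSpan]

theorem pvGoBIdx_eq_listGo (seq : List String) (block_by : String) : ∀ (k i : Nat), seq.length - i ≤ k →
    pvGoBIdx seq block_by i = pvListGo block_by (seq.drop i) := by
  intro k
  induction k with
  | zero =>
    intro i h
    rw [pvGoBIdx]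
    have hi : ¬ i < seq.length := by omega
    simp [hi, List.drop_eq_nil_of_le (by omega : seq.length ≤ i), pvListGo]
  | succ k ih =>
    intro i h
    rw [pvGoBIdx]
    by_cases hi : i < seq.length
    · have hd : seq.drop i = seq[i] :: seq.drop (i + 1) := List.drop_eq_getElem_cons hi
      have hK : pvSpanEnd seq block_by (i + 1)
          = (i + 1) + (pvListSpan block_by (seq.drop (i + 1))).1.length :=
        pvSpanEnd_eq seq block_by (seq.length - (i + 1)) (i + 1) (le_refl _)
      set K := (pvListSpan block_by (seq.drop (i + 1))).1.length with hKdef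
      have hslice : PySem.List.slice seq (some (i : Int)) (some ((pvSpanEnd seq block_by (i + 1) : Nat) : Int))
          = seq[i] :: (pvListSpan block_by (seq.drop (i + 1))).1 := by
        rw [hK, PySem.List.slice_natCast, hd]
        have : (i + 1) + K - i = K + 1 := by omega
        rw [this, List.take_succ_cons]
        rw [← pvListSpan_fst_take]
      have hrest : seq.drop (pvSpanEnd seq block_by (i + 1)) = (pvListSpan block_by (seq.drop (i + 1))).2 := by
        rw [hK, pvListSpan_snd_drop, List.drop_drop]
      rw [if_pos hi, hslice, hd, pvListGo]
      rw [ih (pvSpanEnd seq block_by (i + 1)) (by have := pvSpanEnd_ge seq block_by (i + 1); omega)]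
      rw [hrest]
    · simp [hi, List.drop_eq_nil_of_le (by omega : seq.length ≤ i), pvListGo]

-- ===== VERDICT (by name: the statement is the Claim_ definition above) =====
theorem read_feat_block_spec : Claim_equal_read_feat_block := by
  intro seq block_by _
  show read_feat_block seq block_by = read_feat_block_alt seq block_by
  rw [read_feat_block_eq_listGo, read_feat_block_alt,
    pvGoBIdx_eq_listGo seq block_by seq.length 0 (by omega)]
  simp
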